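-- pv_equiv track=rewrite | github.com/cexen/procon-cexen | py/util_num.py | list_divisors_from_list
-- ===== SOURCE A (Python) =====
-- from collections.abc import Iterable
-- from collections.abc import Iterable
-- from collections.abc import Iterable
--
-- def list_divisors_from_list(x: int, factors: Iterable[int]) -> list[int]:
--     """
--     >>> list_divisors_from_list(60, generate_primes(60))
--     [1, 5, 3, 15, 2, 10, 6, 30, 4, 20, 12, 60]
--     """
--     q = [1]
--     for p in factors:
--         nq = []
--         cnt = 0
--         while x % p == 0:
--             x //= p
--             cnt += 1
--         for m in q:
--             nm = m
--             for _ in range(cnt + 1):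
--                 nq.append(nm)
--                 nm *= p
--         q = nq
--     return q
-- ===== SOURCE B (Python) =====
-- def list_divisors_from_list(x: int, factors) -> list[int]:
--     # Two-pass: first build one power-list per dividing factor (a factor with
--     # multiplicity 0 would contribute the axis [1], a no-op, so it is skipped),
--     # then take the cartesian product (last axis fastest) and multiply tuples.
--     axes = []
--     for p in factors:
--         cnt = 0
--         while x % p == 0:
--             x //= p
--             cnt += 1
--         if cnt:
--             axes.append([p ** e for e in range(cnt + 1)])
--     combos = [[]]
--     for axis in axes:
--         combos = [t + [v] for t in combos for v in axis]
--     res = []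
--     for t in combos:
--         prod = 1
--         for v in t:
--             prod *= v
--         res.append(prod)
--     return res
-- ===== Notes on version B (the rewrite author's own statement) =====
-- stated objective: alternative
-- what changed: B first materialises a prime-power list per dividing factor (skipping factors of multiplicity 0, whose axis [1] is a no-op), then forms their cartesian product and multiplies each tuple, instead of A's single interleaved q-rebuilding loop with a running nm *= p accumulator.
import Mathlib
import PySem

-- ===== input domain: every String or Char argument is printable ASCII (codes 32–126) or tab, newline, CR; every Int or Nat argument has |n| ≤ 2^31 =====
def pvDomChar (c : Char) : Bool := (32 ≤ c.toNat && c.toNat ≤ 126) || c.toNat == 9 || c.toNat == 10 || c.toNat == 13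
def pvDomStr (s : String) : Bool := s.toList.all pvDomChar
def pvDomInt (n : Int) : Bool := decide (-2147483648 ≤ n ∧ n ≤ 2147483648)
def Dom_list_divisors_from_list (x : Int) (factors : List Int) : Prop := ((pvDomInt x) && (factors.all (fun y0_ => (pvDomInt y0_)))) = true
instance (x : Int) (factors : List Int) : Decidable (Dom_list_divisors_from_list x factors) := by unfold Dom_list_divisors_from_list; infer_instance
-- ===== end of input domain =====

-- B builds one prime-power list per factor, then multiplies out their cartesian
-- product, instead of A's interleaved q-rebuilding loop (objective: alternative).

-- shared helper: the identical 'while x % p == 0: x //= p; cnt += 1' loop of both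
-- Pythons; fuel x.natAbs+1 suffices on Pre_ (|p| ≥ 2, x ≠ 0), where |x| halves each step
def countDiv : Nat → Int → Int → Int × Nat
  | 0, x, _ => (x, 0)
  | f + 1, x, p =>
    if PySem.Int.mod x p = 0 then
      let r := countDiv f (PySem.Int.floordiv x p) p
      (r.1, r.2 + 1)
    else (x, 0)

-- ===== PORT A =====
-- 'nm = m; for _ in range(cnt+1): nq.append(nm); nm *= p'
def powRun : Int → Int → Nat → List Int
  | _, _, 0 => []
  | m, p, n + 1 => m :: powRun (m * p) p n

def aLoop : Int → List Int → List Int → List Int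
  | _, [], q => q
  | x, p :: rest, q =>
    let r := countDiv (x.natAbs + 1) x p
    aLoop r.1 rest (q.foldl (fun nq m => nq ++ powRun m p (r.2 + 1)) [])

def list_divisors_from_list (x : Int) (factors : List Int) : List Int :=
  aLoop x factors [1]

-- ===== PORT B =====
-- first pass: '[p ** e for e in range(cnt + 1)]' per factor, threading x
def powLists : Int → List Int → List (List Int)
  | _, [] => []
  | x, p :: rest =>
    let r := countDiv (x.natAbs + 1) x p
    if r.2 = 0 then powLists r.1 rest
    else ((List.range (r.2 + 1)).map (fun e => p ^ e)) :: powLists r.1 rest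

def list_divisors_from_list_alt (x : Int) (factors : List Int) : List Int :=
  let axes := powLists x factors
  let combos := axes.foldl (fun cs axis => cs.flatMap (fun t => axis.map (fun v => t ++ [v]))) [[]]
  combos.map (fun t => t.foldl (· * ·) 1)

-- ===== PRECONDITION & SPEC =====
-- Pre_ excludes exactly the non-returning inputs: a factor of absolute value ≤ 1
-- makes A's while-loop diverge (and p = 0 raises ZeroDivisionError), and x = 0
-- with a nonempty factor list diverges too.
def Pre_list_divisors_from_list (x : Int) (factors : List Int) : Prop :=
  (∀ p ∈ factors, p < -1 ∨ 1 < p) ∧ (x = 0 → factors = [])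
instance (x : Int) (factors : List Int) : Decidable (Pre_list_divisors_from_list x factors) := by
  unfold Pre_list_divisors_from_list; infer_instance
def pvWitness_list_divisors_from_list : Int × List Int := (60, [2, 3, 5])

def Spec_list_divisors_from_list (x : Int) (factors : List Int) (out : List Int) : Prop := out = list_divisors_from_list_alt x factors
instance (x : Int) (factors : List Int) (out : List Int) : Decidable (Spec_list_divisors_from_list x factors out) := by unfold Spec_list_divisors_from_list; infer_instance

-- ===== CLAIM (what is proved, stated in full; the proofs are below) =====
def Claim_equal_list_divisors_from_list : Prop := ∀ (x : Int) (factors : List Int), Dom_list_divisors_from_list x factors → Pre_list_divisors_from_list x factors → Spec_list_divisors_from_list x factors (list_divisors_from_list x factors)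

-- ===== LEMMAS AND PROOFS =====

-- A's step on q, expressed on an axis of powers
def qStep (q : List Int) (axis : List Int) : List Int :=
  q.flatMap (fun m => axis.map (fun v => m * v))

lemma powRun_eq (n : Nat) : ∀ m p : Int, powRun m p n = (List.range n).map (fun e => m * p ^ e) := by
  induction n with
  | zero => intro m p; simp [powRun]
  | succ k ih =>
    intro m p
    simp only [powRun, ih (m * p) p, List.range_succ_eq_map, List.map_cons, List.map_map]
    congr 1
    · ring
    · apply List.map_congr_left
      intro e _
      simp [pow_succ]
      ring

-- A's inner rebuild of q, as qStep on the axis of powers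
lemma astep_eq (q : List Int) (p : Int) (n : Nat) :
    q.foldl (fun nq m => nq ++ powRun m p (n + 1)) []
      = qStep q ((List.range (n + 1)).map (fun e => p ^ e)) := by
  rw [PySem.List.foldl_append_eq_flatMap]
  simp only [List.nil_append, qStep, List.map_map]
  apply List.flatMap_congr
  intro m _
  rw [powRun_eq]
  rfl

lemma aLoop_eq (fs : List Int) : ∀ (x : Int) (q : List Int),
    aLoop x fs q = (powLists x fs).foldl qStep q := by
  induction fs with
  | nil => intro x q; simp [aLoop, powLists]
  | cons p rest ih =>
    intro x q
    simp only [aLoop, powLists]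
    by_cases h : (countDiv (x.natAbs + 1) x p).2 = 0
    · rw [if_pos h, h, ih]
      congr 1
      rw [astep_eq]
      simp [qStep]
    · simp only [if_neg h, List.foldl_cons, ih, astep_eq]

lemma main_comm (axes : List (List Int)) : ∀ combos : List (List Int),
    (axes.foldl (fun cs axis => cs.flatMap (fun t => axis.map (fun v => t ++ [v]))) combos).map
        (fun t => t.foldl (· * ·) 1)
      = axes.foldl qStep (combos.map (fun t => t.foldl (· * ·) 1)) := by
  induction axes with
  | nil => intro combos; simp
  | cons axis rest ih =>
    intro combos
    simp only [List.foldl_cons, ih]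
    congr 1
    simp only [qStep, List.map_flatMap, List.flatMap_map, List.map_map]
    apply List.flatMap_congr
    intro t _
    apply List.map_congr_left
    intro v _
    simp [List.foldl_append]

-- ===== VERDICT (by name: the statement is the Claim_ definition above) =====
theorem list_divisors_from_list_spec : Claim_equal_list_divisors_from_list := by
  intro x factors _ _
  unfold Spec_list_divisors_from_list list_divisors_from_list list_divisors_from_list_alt
  rw [aLoop_eq, main_comm]
  simp
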